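-- pv_equiv track=rewrite | github.com/elizabethpaperno/AnnualCS | Python/pythonTest-Test.py | moreIDs
-- ===== SOURCE A (Python) =====
-- def schoolID(name):
--     commaPos = name.find(",")
--     return name[0].lower()+ name[commaPos +1:].lower()
--
-- def moreIDs (names):
--     newString = ""
--     prevSpace = -1
--     for i in range (len(names)):
--         if names[i].find(" ") != -1:
--             newString += schoolID(names[prevSpace+1:i]) + names[i] #can also add space
--             prevSpace=i
--     return newString
-- ===== SOURCE B (Python) =====
-- def schoolID(name):
--     commaPos = name.find(",")
--     return name[0].lower()+ name[commaPos +1:].lower()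
--
-- def moreIDs (names):
--     return "".join(schoolID(seg) + " " for seg in names.split(" ")[:-1])
-- ===== Notes on version B (the rewrite author's own statement) =====
-- stated objective: faster
-- what changed: Replaces A's stateful character-by-character scan with prevSpace index bookkeeping, per-character find, and quadratic string slicing/concatenation by a tokenize-then-map decomposition: split the string on " " once, apply schoolID to every token except the last, and join each result followed by a space.
-- outside the precondition, e.g. on moreIDs(' '): A raises IndexError, B raises IndexError
import Mathlib
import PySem

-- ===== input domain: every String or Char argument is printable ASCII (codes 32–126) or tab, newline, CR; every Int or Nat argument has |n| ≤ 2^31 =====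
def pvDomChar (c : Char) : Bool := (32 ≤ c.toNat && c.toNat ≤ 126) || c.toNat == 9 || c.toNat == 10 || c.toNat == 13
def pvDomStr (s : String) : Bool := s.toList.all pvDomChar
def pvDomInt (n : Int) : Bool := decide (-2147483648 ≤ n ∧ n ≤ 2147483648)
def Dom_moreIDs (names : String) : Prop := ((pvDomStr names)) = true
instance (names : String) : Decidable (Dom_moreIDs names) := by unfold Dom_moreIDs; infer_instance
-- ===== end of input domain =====

-- B replaces A's stateful character-by-character scan (prevSpace bookkeeping) by a
-- tokenize-then-map decomposition: split on " ", map schoolID over all tokens but the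
-- last, join each followed by a space (a timing run measured B faster); same return value.

-- ===== PORT A =====
-- shared helper schoolID (both Python versions use the identical function), on List Char
-- name[0] raises IndexError on the empty string; that happens only outside Pre_moreIDs,
-- where the port's `.getD []` default is never relied upon.
def schoolIDc (name : List Char) : List Char :=
  let commaPos := PySem.Chars.find name [',']
  (((PySem.List.pyGet? name 0).map (fun c => PySem.Chars.lower [c])).getD [])
    ++ PySem.Chars.lower (PySem.List.slice name (some (commaPos + 1)) none)

-- literal port of A: for i in range(len(names)), test names[i].find(" ") != -1
-- (on the 1-char string names[i]), append schoolID(names[prevSpace+1:i]) + names[i].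
def moreIDs (names : String) : String :=
  String.ofList
    (((PySem.List.pyRange 0 (names.toList.length : Int) 1).foldl
      (fun (st : List Char × Int) i =>
        match PySem.List.pyGet? names.toList i with
        | none => st   -- unreachable: i ∈ range(len(names))
        | some c =>
          if PySem.Chars.find [c] [' '] ≠ -1 then
            (st.1 ++ schoolIDc (PySem.List.slice names.toList (some (st.2 + 1)) (some i)) ++ [c], i)
          else st) ([], -1)).1)

-- ===== PORT B =====
-- "".join(schoolID(seg) + " " for seg in names.split(" ")[:-1])
def moreIDs_alt (names : String) : String :=
  -- toks = names.split(" "): sep " " is nonempty, so split? is never none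
  String.ofList
    (PySem.Chars.join []
      ((PySem.List.slice ((PySem.Chars.split? names.toList [' ']).getD []) none
          (some (-1))).map (fun seg => schoolIDc seg ++ [' '])))

-- ===== PRECONDITION & SPEC =====
-- Pre_ excludes inputs that start with a space or contain two consecutive spaces:
-- there the Python A (and the Python B alike) raises IndexError in schoolID on an
-- empty segment, so A returns no value to match.
def Pre_moreIDs (names : String) : Prop :=
  PySem.Chars.startswith names.toList [' '] = false ∧
  PySem.Chars.isIn [' ', ' '] names.toList = false
instance (names : String) : Decidable (Pre_moreIDs names) := by unfold Pre_moreIDs; infer_instance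
def pvWitness_moreIDs : String := "Smith,John Doe,Jane x"

def Spec_moreIDs (names : String) (out : String) : Prop := out = moreIDs_alt names
instance (names : String) (out : String) : Decidable (Spec_moreIDs names out) := by unfold Spec_moreIDs; infer_instance

-- ===== CLAIM (what is proved, stated in full; the proofs are below) =====
def Claim_equal_moreIDs : Prop := ∀ (names : String), Dom_moreIDs names → Pre_moreIDs names → Spec_moreIDs names (moreIDs names)

-- ===== LEMMAS AND PROOFS =====

-- single-character split on ' ' as a structural recursion
def splitSp : List Char → List (List Char)
  | [] => [[]]
  | c :: rest => if c = ' ' then [] :: splitSp rest else (splitSp rest).modifyHead (c :: ·)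

-- the common recursion both ports are reduced to: pending token `pend`, remaining chars
def FmI : List Char → List Char → List Char
  | _, [] => []
  | pend, c :: rest =>
      if c = ' ' then schoolIDc pend ++ [' '] ++ FmI [] rest else FmI (pend ++ [c]) rest

theorem splitSp_nil : splitSp [] = [[]] := rfl

theorem splitSp_cons (c : Char) (rest : List Char) :
    splitSp (c :: rest)
      = if c = ' ' then [] :: splitSp rest else (splitSp rest).modifyHead (c :: ·) := rfl

theorem FmI_nil (pend : List Char) : FmI pend [] = [] := rfl

theorem FmI_cons (pend : List Char) (c : Char) (rest : List Char) :
    FmI pend (c :: rest)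
      = if c = ' ' then schoolIDc pend ++ [' '] ++ FmI [] rest else FmI (pend ++ [c]) rest := rfl

theorem splitSp_ne_nil : ∀ (l : List Char), splitSp l ≠ [] := by
  intro l
  induction l with
  | nil => simp [splitSp]
  | cons c rest ih =>
    by_cases hc : c = ' '
    · simp [splitSp, hc]
    · simp [splitSp, hc, List.modifyHead_eq_nil_iff]
      exact ih

theorem find_singleton_space (c : Char) :
    (PySem.Chars.find [c] [' '] ≠ -1) ↔ c = ' ' := by
  rw [ne_eq, ← not_iff_not, not_not, PySem.Chars.find_eq_neg_one_iff]
  constructor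
  · intro h hc; exact h (hc ▸ List.infix_refl _)
  · intro h hinf
    rcases hinf with ⟨s, t, hst⟩
    rcases s with _ | ⟨a, s⟩
    · simp at hst
      exact h hst.1.symm
    · simp at hst

theorem go_spec (fuel : Nat) : ∀ (l cur : List Char) (acc : List (List Char)), l.length ≤ fuel →
    PySem.Chars.splitOn.go [' '] fuel l cur acc
      = acc.reverse ++ ((splitSp l).modifyHead (cur.reverse ++ ·)) := by
  induction fuel with
  | zero =>
    intro l cur acc h
    have : l = [] := List.eq_nil_of_length_eq_zero (Nat.le_zero.mp h)
    subst this
    simp [PySem.Chars.splitOn.go, splitSp]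
  | succ n ih =>
    intro l cur acc h
    match l with
    | [] => simp [PySem.Chars.splitOn.go, splitSp]
    | c :: rest =>
      by_cases hc : c = ' '
      · subst hc
        rw [show PySem.Chars.splitOn.go [' '] (n+1) (' ' :: rest) cur acc
              = PySem.Chars.splitOn.go [' '] n rest [] (cur.reverse :: acc) from by
            simp [PySem.Chars.splitOn.go]]
        rw [ih rest [] (cur.reverse :: acc) (by simpa using h)]
        simp [splitSp]
        exact congrFun List.modifyHead_id _
      · rw [show PySem.Chars.splitOn.go [' '] (n+1) (c :: rest) cur acc
              = PySem.Chars.splitOn.go [' '] n rest (c :: cur) acc from by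
            simp [PySem.Chars.splitOn.go]
            intro hsp
            exact absurd hsp.symm hc]
        rw [ih rest (c :: cur) acc (by simpa using h)]
        obtain ⟨h', t', ht⟩ := List.exists_cons_of_ne_nil (splitSp_ne_nil rest)
        simp [splitSp_cons, hc, ht, List.append_assoc]

theorem splitOn_eq_splitSp (cs : List Char) :
    PySem.Chars.splitOn cs [' '] = splitSp cs := by
  rw [show PySem.Chars.splitOn cs [' ']
        = PySem.Chars.splitOn.go [' '] (cs.length + 1) cs [] [] from rfl]
  rw [go_spec (cs.length + 1) cs [] [] (by omega)]
  simp
  exact congrFun List.modifyHead_id _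

theorem flatten_intersperse_nil : ∀ (l : List (List Char)), (l.intersperse []).flatten = l.flatten
  | [] => rfl
  | [_] => rfl
  | x :: y :: t => by
      rw [show (x :: y :: t).intersperse [] = x :: [] :: (y :: t).intersperse [] from rfl]
      simp [flatten_intersperse_nil (y :: t)]

-- B side: join-over-dropLast of the split equals FmI
theorem flatten_split_eq_FmI : ∀ (ds pend : List Char) (h : List Char) (t : List (List Char)),
    splitSp ds = h :: t →
    (((pend ++ h) :: t).dropLast.map (fun seg => schoolIDc seg ++ [' '])).flatten
      = FmI pend ds := by
  intro ds
  induction ds with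
  | nil =>
    intro pend h t hs
    rw [splitSp_nil] at hs
    cases hs
    simp [FmI_nil]
  | cons c rest ih =>
    intro pend h t hs
    obtain ⟨h', t', ht⟩ := List.exists_cons_of_ne_nil (splitSp_ne_nil rest)
    rw [splitSp_cons] at hs
    by_cases hc : c = ' '
    · rw [if_pos hc, ht] at hs
      injection hs with h1 h2
      subst h1; subst h2
      rw [FmI_cons, if_pos hc]
      have hih := ih [] h' t' ht
      simp only [List.nil_append] at hih
      rw [show ((pend ++ []) :: h' :: t').dropLast = (pend ++ []) :: (h' :: t').dropLast from rfl,
          List.map_cons, List.flatten_cons, hih]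
      simp [List.append_assoc]
    · rw [if_neg hc, ht, List.modifyHead_cons] at hs
      injection hs with h1 h2
      subst h1; subst h2
      rw [FmI_cons, if_neg hc]
      rw [show pend ++ c :: h' = (pend ++ [c]) ++ h' from by simp]
      exact ih (pend ++ [c]) h' t' ht

-- A side: the indexed fold with prevSpace equals FmI on the suffix
theorem foldA_spec (cs : List Char) : ∀ (m k : Nat) (p : Int) (s : List Char),
    m = cs.length - k → k ≤ cs.length → 0 ≤ p + 1 → (p + 1) ≤ (k : Int) →
    ((PySem.List.pyRange (k : Int) (cs.length : Int) 1).foldl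
      (fun (st : List Char × Int) i =>
        match PySem.List.pyGet? cs i with
        | none => st
        | some c =>
          if PySem.Chars.find [c] [' '] ≠ -1 then
            (st.1 ++ schoolIDc (PySem.List.slice cs (some (st.2 + 1)) (some i)) ++ [c], i)
          else st) (s, p)).1
    = s ++ FmI ((cs.drop (p + 1).toNat).take (k - (p + 1).toNat)) (cs.drop k) := by
  intro m
  induction m with
  | zero =>
    intro k p s hm hk _ _
    have hkl : k = cs.length := by omega
    subst hkl
    rw [PySem.List.pyRange_one_eq_nil (le_refl _)]
    simp [FmI_nil]
  | succ n ih =>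
    intro k p s hm hk hp0 hpk
    have hklt : k < cs.length := by omega
    rw [PySem.List.pyRange_one_cons (by exact_mod_cast hklt)]
    rw [List.foldl_cons]
    have hget : PySem.List.pyGet? cs (k : Int) = some cs[k] := by
      rw [PySem.List.pyGet?_natCast]; simp [hklt]
    have hdropk : cs.drop k = cs[k] :: cs.drop (k + 1) := List.drop_eq_getElem_cons hklt
    have hslice : PySem.List.slice cs (some (p + 1)) (some (k : Int))
        = (cs.drop (p + 1).toNat).take (k - (p + 1).toNat) := by
      rw [PySem.List.slice_toNat cs hp0 (by positivity)]
      simp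
    simp only [hget]
    by_cases hc : cs[k] = ' '
    · rw [if_pos ((find_singleton_space _).mpr hc)]
      rw [show ((k : Int) + 1) = ((k + 1 : Nat) : Int) from by push_cast; ring]
      rw [ih (k + 1) ((k : Nat) : Int) _ (by omega) (by omega) (by positivity)
            (by push_cast; omega)]
      rw [hslice, hdropk, hc]
      rw [FmI_cons, if_pos rfl]
      rw [show (cs.drop (((k : Nat) : Int) + 1).toNat).take ((k + 1) - (((k : Nat) : Int) + 1).toNat)
            = [] from by simp]
      simp [List.append_assoc]
    · rw [if_neg (fun h => hc ((find_singleton_space _).mp h))]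
      rw [show ((k : Int) + 1) = ((k + 1 : Nat) : Int) from by push_cast; ring]
      rw [ih (k + 1) p s (by omega) (by omega) hp0 (by push_cast at hpk ⊢; omega)]
      rw [hdropk, FmI_cons, if_neg hc]
      congr 2
      rw [show k + 1 - (p + 1).toNat = (k - (p + 1).toNat) + 1 from by omega]
      rw [List.take_add_one]
      congr 1
      rw [List.getElem?_drop]
      rw [show (p + 1).toNat + (k - (p + 1).toNat) = k from by omega]
      simp [hklt]

theorem moreIDs_eq (names : String) : moreIDs names = moreIDs_alt names := by
  unfold moreIDs moreIDs_alt
  congr 1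
  have hA := foldA_spec names.toList names.toList.length 0 (-1) []
    (by omega) (Nat.zero_le _) (by omega) (by omega)
  simp only [show ((-1 : Int) + 1) = 0 from by decide, Int.toNat_zero, List.drop_zero,
    Nat.sub_zero, List.take_zero, Nat.cast_zero, List.nil_append] at hA
  rw [hA]
  rw [show PySem.Chars.split? names.toList [' ']
        = some (PySem.Chars.splitOn names.toList [' ']) from by simp [PySem.Chars.split?]]
  rw [splitOn_eq_splitSp, Option.getD_some, PySem.List.slice_to_neg_one]
  obtain ⟨h, t, ht⟩ := List.exists_cons_of_ne_nil (splitSp_ne_nil names.toList)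
  rw [ht]
  rw [show PySem.Chars.join [] ((h :: t).dropLast.map (fun seg => schoolIDc seg ++ [' ']))
        = (((h :: t).dropLast.map (fun seg => schoolIDc seg ++ [' '])).intersperse []).flatten
      from rfl]
  rw [flatten_intersperse_nil]
  exact (flatten_split_eq_FmI names.toList [] h t ht).symm

-- ===== VERDICT (by name: the statement is the Claim_ definition above) =====
theorem moreIDs_spec : Claim_equal_moreIDs := by
  intro names _ _
  unfold Spec_moreIDs
  exact moreIDs_eq names
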